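-- pv_equiv track=rewrite | github.com/Paramu56/PoC | ingest_karnataka_schemes.py | _parse_scheme_blocks_from_lines
-- ===== SOURCE A (Python) =====
-- from typing import List, Optional, Tuple
--
-- def _parse_scheme_blocks_from_lines(lines: List[str]) -> List[Tuple[str, List[str]]]:
--     """
--     Heuristic parser:
--     - A scheme starts at a non-empty line whose *next non-empty* line starts with 'Category:'.
--     - Capture lines until the next scheme start.
--     Returns: list of (scheme_name, block_lines).
--     """
--     def next_nonempty_idx(start: int) -> Optional[int]:
--         for j in range(start, len(lines)):
--             if lines[j].strip():
--                 return j
--         return None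
--
--     starts: List[int] = []
--     for i in range(len(lines)):
--         if not lines[i].strip():
--             continue
--         j = next_nonempty_idx(i + 1)
--         if j is None:
--             continue
--         if lines[j].lstrip().startswith("Category:"):
--             starts.append(i)
--
--     blocks: List[Tuple[str, List[str]]] = []
--     for idx, start in enumerate(starts):
--         end = starts[idx + 1] if idx + 1 < len(starts) else len(lines)
--         scheme_name = lines[start].strip()
--         block = [ln.rstrip() for ln in lines[start:end] if ln.strip()]
--         blocks.append((scheme_name, block))
--     return blocks
-- ===== SOURCE B (Python) =====
-- from typing import List, Tuple
--
-- def _parse_scheme_blocks_from_lines(lines: List[str]) -> List[Tuple[str, List[str]]]: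
--     n = len(lines)
--     # one backward pass: nxt[j] = index of first non-empty line at or after j (None if none)
--     nxt = [None] * (n + 1)
--     for j in range(n - 1, -1, -1):
--         nxt[j] = j if lines[j].strip() else nxt[j + 1]
--     starts = [i for i in range(n)
--               if lines[i].strip()
--               and nxt[i + 1] is not None
--               and lines[nxt[i + 1]].lstrip().startswith("Category:")]
--     return [(lines[s].strip(), [ln.rstrip() for ln in lines[s:e] if ln.strip()])
--             for s, e in zip(starts, starts[1:] + [n])]
-- ===== Notes on version B (the rewrite author's own statement) =====
-- stated objective: faster
-- what changed: Replaces A's per-line forward rescan for the next non-empty line (quadratic) with one backward pass precomputing a next-nonempty-index array, and builds the blocks by zipping consecutive starts instead of enumerate with index lookups.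
import Mathlib
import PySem

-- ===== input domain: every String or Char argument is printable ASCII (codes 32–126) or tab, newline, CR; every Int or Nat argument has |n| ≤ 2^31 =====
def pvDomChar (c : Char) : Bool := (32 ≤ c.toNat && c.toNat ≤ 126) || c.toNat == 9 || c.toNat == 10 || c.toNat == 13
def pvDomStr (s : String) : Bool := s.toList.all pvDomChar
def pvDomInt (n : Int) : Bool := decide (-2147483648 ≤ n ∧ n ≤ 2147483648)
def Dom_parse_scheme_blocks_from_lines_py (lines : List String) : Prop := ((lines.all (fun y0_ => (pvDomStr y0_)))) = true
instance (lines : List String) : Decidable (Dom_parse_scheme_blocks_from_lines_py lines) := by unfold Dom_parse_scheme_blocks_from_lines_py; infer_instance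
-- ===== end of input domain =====

-- B replaces A's quadratic next-nonempty rescans by one backward precomputation pass (asymptotically faster); return values agree on all inputs.

-- ===== PORT A =====
-- inner helper next_nonempty_idx: scan j = start, start+1, … until a non-empty (after strip) line
def pvNextNonempty (lines : List String) (j : Nat) : Option Nat :=
  if _h : j < lines.length then
    if PySem.Str.strip (lines.getD j "") ≠ "" then some j
    else pvNextNonempty lines (j + 1)
  else none
termination_by lines.length - j

-- first loop of A: collect the start indices
def pvStartsA (lines : List String) : List Nat :=
  (List.range lines.length).foldl (fun acc i =>
    if PySem.Str.strip (lines.getD i "") = "" then acc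
    else
      match pvNextNonempty lines (i + 1) with
      | none => acc
      | some j =>
        if PySem.Str.startswith (PySem.Str.lstrip (lines.getD j "")) "Category:" then acc ++ [i]
        else acc) []

def parse_scheme_blocks_from_lines_py (lines : List String) : List (String × List String) :=
  let starts := pvStartsA lines
  (List.range starts.length).foldl (fun blocks idx =>
    let start := starts.getD idx 0
    let e := if idx + 1 < starts.length then starts.getD (idx + 1) 0 else lines.length
    let scheme_name := PySem.Str.strip (lines.getD start "")
    let block := ((PySem.List.slice lines (some (start : Int)) (some (e : Int))).filter
        (fun ln => decide (PySem.Str.strip ln ≠ ""))).map PySem.Str.rstrip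
    blocks ++ [(scheme_name, block)]) []

-- ===== PORT B =====
-- backward pass: nxt[j] = first non-empty index ≥ j (entry n is None); foldr over range n fills backward
def pvNxtArr (lines : List String) : List (Option Nat) :=
  (List.range lines.length).foldr
    (fun j acc =>
      (if PySem.Str.strip (lines.getD j "") ≠ "" then some j else acc.headD none) :: acc)
    [none]

def pvStartsB (lines : List String) : List Nat :=
  let nxt := pvNxtArr lines
  (List.range lines.length).filter (fun i =>
    decide (PySem.Str.strip (lines.getD i "") ≠ "") &&
      match nxt.getD (i + 1) none with
      | none => false
      | some j => PySem.Str.startswith (PySem.Str.lstrip (lines.getD j "")) "Category:")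

def parse_scheme_blocks_from_lines_py_alt (lines : List String) : List (String × List String) :=
  let starts := pvStartsB lines
  (starts.zip (starts.tail ++ [lines.length])).map (fun se =>
    (PySem.Str.strip (lines.getD se.1 ""),
     ((PySem.List.slice lines (some (se.1 : Int)) (some (se.2 : Int))).filter
        (fun ln => decide (PySem.Str.strip ln ≠ ""))).map PySem.Str.rstrip))

-- ===== PRECONDITION & SPEC =====
def Spec_parse_scheme_blocks_from_lines_py (lines : List String) (out : List (String × List String)) : Prop := out = parse_scheme_blocks_from_lines_py_alt lines
instance (lines : List String) (out : List (String × List String)) : Decidable (Spec_parse_scheme_blocks_from_lines_py lines out) := by unfold Spec_parse_scheme_blocks_from_lines_py; infer_instance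

-- ===== CLAIM (what is proved, stated in full; the proofs are below) =====
def Claim_equal_parse_scheme_blocks_from_lines_py : Prop := ∀ (lines : List String), Dom_parse_scheme_blocks_from_lines_py lines → Spec_parse_scheme_blocks_from_lines_py lines (parse_scheme_blocks_from_lines_py lines)

-- ===== LEMMAS AND PROOFS =====

-- the backward-filled array is pointwise the forward scan
theorem pvNxtArr_range' (lines : List String) :
    ∀ (b a : Nat), a + b = lines.length →
      (List.range' a b).foldr
        (fun j acc =>
          (if PySem.Str.strip (lines.getD j "") ≠ "" then some j else acc.headD none) :: acc)
        [none]
      = (List.range' a (b + 1)).map (pvNextNonempty lines) := by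
  intro b
  induction b with
  | zero =>
      intro a ha
      have hna : ¬ a < lines.length := by omega
      simp only [List.range'_zero, List.foldr_nil]
      rw [List.range'_one, List.map_cons, List.map_nil, pvNextNonempty.eq_def]
      simp [hna]
  | succ b ih =>
      intro a ha
      rw [List.range'_succ, List.foldr_cons, ih (a + 1) (by omega)]
      have hlt : a < lines.length := by omega
      have hhead : ((List.range' (a + 1) (b + 1)).map (pvNextNonempty lines)).headD none
          = pvNextNonempty lines (a + 1) := by
        rw [List.range'_succ]
        simp
      rw [hhead]
      have hstep : pvNextNonempty lines a
          = if PySem.Str.strip (lines.getD a "") ≠ "" then some a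
            else pvNextNonempty lines (a + 1) := by
        rw [pvNextNonempty.eq_def]
        simp [hlt]
      conv_rhs => rw [List.range'_succ]
      rw [List.map_cons, ← hstep]

theorem pvNxtArr_eq_map (lines : List String) :
    pvNxtArr lines = (List.range' 0 (lines.length + 1)).map (pvNextNonempty lines) := by
  unfold pvNxtArr
  rw [List.range_eq_range']
  exact pvNxtArr_range' lines lines.length 0 (by omega)

theorem pvNxtArr_getD (lines : List String) (k : Nat) (hk : k ≤ lines.length) :
    (pvNxtArr lines).getD k none = pvNextNonempty lines k := by
  rw [pvNxtArr_eq_map]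
  have hk' : k < ((List.range' 0 (lines.length + 1)).map (pvNextNonempty lines)).length := by
    simp; omega
  rw [List.getD_eq_getElem _ _ hk']
  simp

-- the two starts lists coincide
theorem starts_eq (lines : List String) : pvStartsA lines = pvStartsB lines := by
  unfold pvStartsA pvStartsB
  have hcongr : ∀ (acc : List Nat) (i : Nat), i ∈ List.range lines.length →
      (if PySem.Str.strip (lines.getD i "") = "" then acc
       else
         match pvNextNonempty lines (i + 1) with
         | none => acc
         | some j =>
           if PySem.Str.startswith (PySem.Str.lstrip (lines.getD j "")) "Category:" then acc ++ [i]
           else acc)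
      = (if (decide (PySem.Str.strip (lines.getD i "") ≠ "") &&
            match (pvNxtArr lines).getD (i + 1) none with
            | none => false
            | some j => PySem.Str.startswith (PySem.Str.lstrip (lines.getD j "")) "Category:")
         then acc ++ [i] else acc) := by
    intro acc i hi
    rw [List.mem_range] at hi
    rw [pvNxtArr_getD lines (i + 1) (by omega)]
    generalize PySem.Str.strip (lines.getD i "") = s
    by_cases he : s = ""
    · simp [he]
    · cases pvNextNonempty lines (i + 1) with
      | none => simp [he]
      | some j => simp [he]
  refine Eq.trans (PySem.List.foldl_congr_mem _ _ _ _ hcongr) ?_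
  rw [PySem.List.foldl_append_if_eq_filter]
  simp

-- enumerate-with-index-lookup fold equals map over zip of consecutive elements
theorem blocks_shape {β : Type} (g : Nat → Nat → β) (n : Nat) :
    ∀ (s : List Nat),
      (List.range s.length).map
        (fun idx => g (s.getD idx 0) (if idx + 1 < s.length then s.getD (idx + 1) 0 else n))
      = (s.zip (s.tail ++ [n])).map (fun se => g se.1 se.2) := by
  intro s
  induction s with
  | nil => simp
  | cons x rest ih =>
      rw [List.length_cons, List.range_succ_eq_map, List.map_cons, List.map_map]
      have htail :
          (List.range rest.length).map
            ((fun idx => g ((x :: rest).getD idx 0)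
                (if idx + 1 < rest.length + 1 then (x :: rest).getD (idx + 1) 0 else n)) ∘ Nat.succ)
          = (List.range rest.length).map
            (fun idx => g (rest.getD idx 0) (if idx + 1 < rest.length then rest.getD (idx + 1) 0 else n)) := by
        apply List.map_congr_left
        intro idx _
        simp only [Function.comp_apply, Nat.succ_eq_add_one, List.getD_cons_succ,
          Nat.add_lt_add_iff_right]
      rw [htail, ih]
      cases rest with
      | nil => simp
      | cons y r' => simp

theorem parse_eq (lines : List String) :
    parse_scheme_blocks_from_lines_py lines = parse_scheme_blocks_from_lines_py_alt lines := by
  unfold parse_scheme_blocks_from_lines_py parse_scheme_blocks_from_lines_py_alt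
  rw [starts_eq]
  rw [PySem.List.foldl_append_singleton_eq_map]
  rw [blocks_shape
    (fun s e =>
      (PySem.Str.strip (lines.getD s ""),
       ((PySem.List.slice lines (some (s : Int)) (some (e : Int))).filter
          (fun ln => decide (PySem.Str.strip ln ≠ ""))).map PySem.Str.rstrip))
    lines.length (pvStartsB lines)]
  simp

-- ===== VERDICT (by name: the statement is the Claim_ definition above) =====
theorem parse_scheme_blocks_from_lines_py_spec : Claim_equal_parse_scheme_blocks_from_lines_py := by
  intro lines _hdom
  unfold Spec_parse_scheme_blocks_from_lines_py
  exact parse_eq lines
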